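-- pv_equiv track=rewrite | github.com/cbuyalos/NU2025REU | Extending Lemma 4.2.py | divides_spm1
-- ===== SOURCE A (Python) =====
-- def divides_spm1(s: int):
--     output = []
--     for i in range(2, s + 2):
--         if (s+1) % i == 0 and i not in output:
--             output.append(i)
--         if (s-1) % i == 0 and i not in output:
--             output.append(i)
--     return output
-- ===== SOURCE B (Python) =====
-- def _divisors(n):
--     # all positive divisors of n >= 1, unordered, via sqrt enumeration
--     out = []
--     i = 1
--     while i * i <= n:
--         if n % i == 0:
--             out.append(i)
--             if i != n // i:
--                 out.append(n // i)
--         i += 1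
--     return out
--
--
-- def divides_spm1(s: int):
--     if s <= 0:
--         return []
--     ds = set(_divisors(s + 1))
--     if s >= 2:
--         ds.update(_divisors(s - 1))
--     return sorted(d for d in ds if d >= 2)
-- ===== Notes on version B (the rewrite author's own statement) =====
-- stated objective: faster
-- what changed: Instead of scanning every i in [2, s+1] and testing membership in the growing output list, B enumerates the divisors of s+1 and s-1 up to their square roots (pairing each small divisor with its cofactor), takes the set union, filters out values below 2 and sorts.
import Mathlib
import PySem

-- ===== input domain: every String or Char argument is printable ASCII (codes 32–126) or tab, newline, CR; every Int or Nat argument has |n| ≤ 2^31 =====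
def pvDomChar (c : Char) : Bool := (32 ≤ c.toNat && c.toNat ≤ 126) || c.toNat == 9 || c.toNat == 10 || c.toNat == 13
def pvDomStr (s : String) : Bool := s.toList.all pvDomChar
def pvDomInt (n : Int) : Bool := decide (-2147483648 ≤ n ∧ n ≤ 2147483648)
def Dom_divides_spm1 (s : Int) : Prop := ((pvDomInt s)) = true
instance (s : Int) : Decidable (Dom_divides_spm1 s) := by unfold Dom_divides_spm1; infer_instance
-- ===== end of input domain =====

-- B replaces A's linear scan over [2, s+1] by sqrt-bounded divisor enumeration of s+1 and s-1,
-- set union, filter ≥ 2 and a sort (measured faster, asymptotic change).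

-- ===== PORT A =====
def divides_spm1 (s : Int) : List Int :=
  (PySem.List.pyRange 2 (s + 2) 1).foldl
    (fun output i =>
      let output := if PySem.Int.mod (s + 1) i == 0 && !(output.contains i) then output ++ [i] else output
      if PySem.Int.mod (s - 1) i == 0 && !(output.contains i) then output ++ [i] else output)
    []

-- ===== PORT B =====
-- `while i * i <= n: ...` loop of Source B's _divisors; fuel only makes the recursion structural
-- (fuel = n.toNat suffices for the call below, the loop stops once i * i > n)
def pvDivisorsAux (n : Int) : Nat → Int → List Int → List Int
  | 0, _, out => out
  | fuel + 1, i, out =>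
    if i * i ≤ n then
      if PySem.Int.mod n i == 0 then
        let out := out ++ [i]
        if i != PySem.Int.floordiv n i then
          pvDivisorsAux n fuel (i + 1) (out ++ [PySem.Int.floordiv n i])
        else
          pvDivisorsAux n fuel (i + 1) out
      else
        pvDivisorsAux n fuel (i + 1) out
    else out

def pvDivisors (n : Int) : List Int := pvDivisorsAux n n.toNat 1 []

def divides_spm1_alt (s : Int) : List Int :=
  if s ≤ 0 then []
  else
    let ds : PySem.Set Int := PySem.Set.ofList (pvDivisors (s + 1))
    let ds := if 2 ≤ s then PySem.Set.update ds (pvDivisors (s - 1)) else ds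
    PySem.List.sorted (ds.filter (fun d => decide (2 ≤ d))) (fun x => x) false

-- ===== PRECONDITION & SPEC =====
def Spec_divides_spm1 (s : Int) (out : List Int) : Prop := out = divides_spm1_alt s
instance (s : Int) (out : List Int) : Decidable (Spec_divides_spm1 s out) := by unfold Spec_divides_spm1; infer_instance

-- ===== CLAIM (what is proved, stated in full; the proofs are below) =====
def Claim_equal_divides_spm1 : Prop := ∀ (s : Int), Dom_divides_spm1 s → Spec_divides_spm1 s (divides_spm1 s)

-- ===== LEMMAS AND PROOFS =====

-- A's loop body appends i exactly when i divides s+1 or s-1, provided i is fresh.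
lemma foldA_eq_filter (s : Int) (l acc : List Int) (hl : l.Pairwise (· < ·))
    (hacc : ∀ x ∈ acc, ∀ i ∈ l, x < i) :
    l.foldl
      (fun output i =>
        let output := if PySem.Int.mod (s + 1) i == 0 && !(output.contains i) then output ++ [i] else output
        if PySem.Int.mod (s - 1) i == 0 && !(output.contains i) then output ++ [i] else output)
      acc
    = acc ++ l.filter (fun i => PySem.Int.mod (s + 1) i == 0 || PySem.Int.mod (s - 1) i == 0) := by
  induction l generalizing acc with
  | nil => simp
  | cons i t ih =>
    rw [List.pairwise_cons] at hl
    obtain ⟨hit, ht⟩ := hl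
    have hnot : i ∉ acc := fun h => lt_irrefl i (hacc i h i (List.mem_cons_self ..))
    have hacc1 : ∀ x ∈ acc ++ [i], ∀ j ∈ t, x < j := by
      intro x hx j hj
      rcases List.mem_append.1 hx with h | h
      · exact hacc x h j (List.mem_cons_of_mem _ hj)
      · simp only [List.mem_singleton] at h; subst h; exact hit j hj
    have hacc0 : ∀ x ∈ acc, ∀ j ∈ t, x < j := fun x hx j hj => hacc x hx j (List.mem_cons_of_mem _ hj)
    have hci : acc.contains i = false := by simpa using hnot
    have key : (let output := if PySem.Int.mod (s + 1) i == 0 && !(acc.contains i) then acc ++ [i] else acc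
        if PySem.Int.mod (s - 1) i == 0 && !(output.contains i) then output ++ [i] else output)
        = if PySem.Int.mod (s + 1) i == 0 || PySem.Int.mod (s - 1) i == 0 then acc ++ [i] else acc := by
      cases h1 : (PySem.Int.mod (s + 1) i == 0) <;> cases h2 : (PySem.Int.mod (s - 1) i == 0) <;>
        simp [h1, h2, hci, hnot]
    rw [List.foldl_cons, key, List.filter_cons]
    cases hco : (PySem.Int.mod (s + 1) i == 0 || PySem.Int.mod (s - 1) i == 0)
    · rw [if_neg (by simp), if_neg (by simp)]
      exact ih acc ht hacc0
    · rw [if_pos rfl, if_pos rfl, ih (acc ++ [i]) ht hacc1]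
      simp

lemma mem_divAux (n d : Int) : ∀ (fuel : Nat) (i : Int) (out : List Int), 1 ≤ i → (n + 1 - i).toNat ≤ fuel →
    (d ∈ pvDivisorsAux n fuel i out ↔
      d ∈ out ∨ ∃ j, i ≤ j ∧ j * j ≤ n ∧ PySem.Int.mod n j = 0 ∧ (d = j ∨ d = PySem.Int.floordiv n j)) := by
  intro fuel
  induction fuel with
  | zero =>
    intro i out hi hle
    have hni : n < i := by omega
    rw [pvDivisorsAux]
    constructor
    · exact Or.inl
    · rintro (h | ⟨j, hij, hjj, _, _⟩)
      · exact h
      · exfalso; nlinarith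
  | succ fuel ih =>
    intro i out hi hle
    have esplit : ∀ (Q : Int → Prop), (∃ j, i ≤ j ∧ Q j) ↔ Q i ∨ (∃ j, i + 1 ≤ j ∧ Q j) := by
      intro Q
      constructor
      · rintro ⟨j, hij, hq⟩
        rcases eq_or_lt_of_le hij with rfl | h
        · exact Or.inl hq
        · exact Or.inr ⟨j, by omega, hq⟩
      · rintro (hq | ⟨j, hij, hq⟩)
        · exact ⟨i, le_refl i, hq⟩
        · exact ⟨j, by omega, hq⟩
    rw [pvDivisorsAux]
    by_cases hsq : i * i ≤ n
    · have hin : i ≤ n := by nlinarith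
      rw [if_pos hsq]
      by_cases hmod : PySem.Int.mod n i = 0
      · rw [if_pos (by simpa using hmod)]
        by_cases hne : i = PySem.Int.floordiv n i
        · rw [if_neg (by simpa using hne)]
          rw [ih (i + 1) (out ++ [i]) (by omega) (by omega)]
          rw [esplit]
          simp only [List.mem_append, List.mem_singleton]
          constructor
          · rintro ((h | h) | h)
            · exact Or.inl h
            · exact Or.inr (Or.inl ⟨hsq, hmod, Or.inl h⟩)
            · exact Or.inr (Or.inr h)
          · rintro (h | (⟨_, _, (h | h)⟩ | h))
            · exact Or.inl (Or.inl h)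
            · exact Or.inl (Or.inr h)
            · exact Or.inl (Or.inr (by rw [h, ← hne]))
            · exact Or.inr h
        · rw [if_pos (by simpa using hne)]
          rw [ih (i + 1) (out ++ [i] ++ [PySem.Int.floordiv n i]) (by omega) (by omega)]
          rw [esplit]
          simp only [List.mem_append, List.mem_singleton]
          constructor
          · rintro (((h | h) | h) | h)
            · exact Or.inl h
            · exact Or.inr (Or.inl ⟨hsq, hmod, Or.inl h⟩)
            · exact Or.inr (Or.inl ⟨hsq, hmod, Or.inr h⟩)
            · exact Or.inr (Or.inr h)
          · rintro (h | (⟨_, _, (h | h)⟩ | h))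
            · exact Or.inl (Or.inl (Or.inl h))
            · exact Or.inl (Or.inl (Or.inr h))
            · exact Or.inl (Or.inr h)
            · exact Or.inr h
      · rw [if_neg (by simpa using hmod)]
        rw [ih (i + 1) out (by omega) (by omega)]
        rw [esplit]
        constructor
        · rintro (h | h)
          · exact Or.inl h
          · exact Or.inr (Or.inr h)
        · rintro (h | (⟨_, hm, _⟩ | h))
          · exact Or.inl h
          · exact absurd hm hmod
          · exact Or.inr h
    · rw [if_neg hsq]
      constructor
      · exact Or.inl
      · rintro (h | ⟨j, hij, hjj, _, _⟩)
        · exact h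
        · exfalso; nlinarith

lemma mem_divisors (n d : Int) (hn : 1 ≤ n) :
    d ∈ pvDivisors n ↔ 1 ≤ d ∧ d ∣ n := by
  rw [pvDivisors, mem_divAux n d n.toNat 1 [] (by omega) (by omega)]
  simp only [List.not_mem_nil, false_or]
  constructor
  · rintro ⟨j, h1j, hjj, hmod, hd⟩
    have hjdvd : j ∣ n := (PySem.Int.mod_eq_zero_iff_dvd n j).1 hmod
    obtain ⟨k, hk⟩ := hjdvd
    have hk1 : 1 ≤ k := by nlinarith
    have hfd : PySem.Int.floordiv n j = k := by
      rw [PySem.Int.floordiv_eq_ediv_of_pos (by omega), hk, Int.mul_ediv_cancel_left _ (by omega)]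
    rcases hd with rfl | rfl
    · exact ⟨h1j, ⟨k, hk⟩⟩
    · rw [hfd]
      exact ⟨hk1, ⟨j, by rw [hk]; ring⟩⟩
  · rintro ⟨hd1, hdvd⟩
    obtain ⟨k, hk⟩ := hdvd
    have hdn : d ≤ n := Int.le_of_dvd (by omega) ⟨k, hk⟩
    have hk1 : 1 ≤ k := by nlinarith
    by_cases hdd : d * d ≤ n
    · exact ⟨d, hd1, hdd, (PySem.Int.mod_eq_zero_iff_dvd n d).2 ⟨k, hk⟩, Or.inl rfl⟩
    · refine ⟨k, hk1, by nlinarith, (PySem.Int.mod_eq_zero_iff_dvd n k).2 ⟨d, by rw [hk]; ring⟩, Or.inr ?_⟩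
      rw [PySem.Int.floordiv_eq_ediv_of_pos (by omega), hk, mul_comm, Int.mul_ediv_cancel_left _ (by omega)]

-- ===== VERDICT (by name: the statement is the Claim_ definition above) =====
theorem divides_spm1_spec : Claim_equal_divides_spm1 := by
  intro s _
  unfold Spec_divides_spm1
  by_cases hs : s ≤ 0
  · simp [divides_spm1, divides_spm1_alt, hs, PySem.List.pyRange_one_eq_nil (by omega : s + 2 ≤ 2)]
  · rw [not_le] at hs
    by_cases hs1 : s = 1
    · subst hs1; decide
    · have hs2 : 2 ≤ s := by omega
      have hA : divides_spm1 s = (PySem.List.pyRange 2 (s + 2) 1).filter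
          (fun i => PySem.Int.mod (s + 1) i == 0 || PySem.Int.mod (s - 1) i == 0) := by
        rw [divides_spm1,
          foldA_eq_filter s _ [] (PySem.List.pairwise_lt_pyRange_one 2 (s + 2)) (by simp),
          List.nil_append]
      have hpairA : (divides_spm1 s).Pairwise (· < ·) := by
        rw [hA]; exact (PySem.List.pairwise_lt_pyRange_one 2 (s + 2)).filter _
      have hnodupA : (divides_spm1 s).Nodup := hpairA.imp (fun h => ne_of_lt h)
      rw [divides_spm1_alt, if_neg (by omega : ¬ s ≤ 0)]
      simp only [if_pos hs2]
      have hnodupB : ((PySem.Set.update (PySem.Set.ofList (pvDivisors (s + 1)))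
          (pvDivisors (s - 1))).filter (fun d => decide (2 ≤ d))).Nodup :=
        List.Nodup.filter _ (PySem.Set.nodup_update _ _ (PySem.Set.nodup_ofList _))
      have hmem : ∀ a : Int, a ∈ ((PySem.Set.update (PySem.Set.ofList (pvDivisors (s + 1)))
          (pvDivisors (s - 1))).filter (fun d => decide (2 ≤ d))) ↔ a ∈ divides_spm1 s := by
        intro a
        rw [hA]
        simp only [List.mem_filter, PySem.Set.mem_update, PySem.Set.mem_ofList,
          PySem.List.mem_pyRange_one, decide_eq_true_eq, Bool.or_eq_true, beq_iff_eq,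
          PySem.Int.mod_eq_zero_iff_dvd,
          mem_divisors (s + 1) a (by omega), mem_divisors (s - 1) a (by omega)]
        constructor
        · rintro ⟨(⟨h1a, hdvd⟩ | ⟨h1a, hdvd⟩), h2a⟩
          · exact ⟨⟨h2a, by have := Int.le_of_dvd (by omega) hdvd; omega⟩, Or.inl hdvd⟩
          · exact ⟨⟨h2a, by have := Int.le_of_dvd (by omega) hdvd; omega⟩, Or.inr hdvd⟩
        · rintro ⟨⟨h2a, _⟩, (hdvd | hdvd)⟩
          · exact ⟨Or.inl ⟨by omega, hdvd⟩, h2a⟩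
          · exact ⟨Or.inr ⟨by omega, hdvd⟩, h2a⟩
      exact (PySem.List.sorted_eq_of_perm_of_pairwise_lt _ _ (fun x => x)
        ((List.perm_ext_iff_of_nodup hnodupA hnodupB).2
          (fun a => (hmem a).symm)) hpairA).symm
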